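-- pv_equiv track=rewrite | github.com/PalakAtGitHub/Musically-Aligned-Neural-Network-Translation-and-Song-Generation | src/testing/batch_synthesize.py | group_examples_by_song
-- ===== SOURCE A (Python) =====
-- from typing import List, Dict, Optional
--
-- def group_examples_by_song(data: List[Dict]) -> Dict[str, List[Dict]]:
--     """Group training examples by song ID, preserving line order."""
--     songs = {}
--     for ex in data:
--         song_id = ex["song_name"].split("_line")[0]
--         songs.setdefault(song_id, []).append(ex)
--     # Sort lines within each song by line index
--     for song_id in songs:
--         songs[song_id].sort(key=lambda x: x["song_name"])
--     return songs
-- ===== SOURCE B (Python) =====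
-- from typing import List, Dict
--
-- def group_examples_by_song(data: List[Dict]) -> Dict[str, List[Dict]]:
--     """Group training examples by song ID, preserving line order."""
--     # Keys in first-appearance order; one global stable sort replaces per-group sorts.
--     songs = {ex["song_name"].split("_line")[0]: [] for ex in data}
--     for ex in sorted(data, key=lambda x: x["song_name"]):
--         songs[ex["song_name"].split("_line")[0]].append(ex)
--     return songs
-- ===== Notes on version B (the rewrite author's own statement) =====
-- stated objective: alternative
-- what changed: B replaces A's per-group in-place sorts with a single global stable sort of the whole list followed by one grouping pass into pre-inserted keys (stability makes each group's order identical to A's per-group sort).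
import Mathlib
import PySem

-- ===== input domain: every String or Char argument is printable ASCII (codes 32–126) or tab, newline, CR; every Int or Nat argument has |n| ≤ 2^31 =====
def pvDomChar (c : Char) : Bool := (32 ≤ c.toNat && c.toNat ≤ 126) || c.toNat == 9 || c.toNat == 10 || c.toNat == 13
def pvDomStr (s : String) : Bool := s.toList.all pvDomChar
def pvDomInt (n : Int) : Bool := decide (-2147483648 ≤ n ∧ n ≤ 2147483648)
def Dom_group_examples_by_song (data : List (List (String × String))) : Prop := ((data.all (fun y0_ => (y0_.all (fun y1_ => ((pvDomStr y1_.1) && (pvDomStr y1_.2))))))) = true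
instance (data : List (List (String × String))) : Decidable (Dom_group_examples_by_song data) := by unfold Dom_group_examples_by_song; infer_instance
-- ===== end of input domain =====

-- B: one global stable sort + one grouping pass replaces A's per-group sorts; same return value.

-- shared helpers: ex["song_name"] (first-match lookup; Pre_ guarantees the key is present,
-- so the .getD "" default is never the computed value inside Pre_) and the song id
-- ex["song_name"].split("_line")[0] (split? with a nonempty separator is always a
-- nonempty some-list, so .getD []/.headD "" are never the computed value).
def pvName (ex : List (String × String)) : String :=
  (List.lookup "song_name" ex).getD ""

def pvSid (ex : List (String × String)) : String :=
  ((PySem.Str.split? (pvName ex) "_line").getD []).headD ""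

-- ===== PORT A =====
def group_examples_by_song (data : List (List (String × String))) : List (String × List (List (String × String))) :=
  -- songs.setdefault(sid, []).append(ex)  ≡  songs[sid] = songs.get(sid, []) + [ex]  = Dict.modify
  let songs := data.foldl (fun d ex => d.modify (pvSid ex) [] (fun l => l ++ [ex])) PySem.Dict.empty
  -- for song_id in songs: songs[song_id].sort(key=...)  — sort each value in place, keys untouched
  songs.items.map (fun kv => (kv.1, PySem.List.sorted kv.2 pvName false))

-- ===== PORT B =====
def group_examples_by_song_alt (data : List (List (String × String))) : List (String × List (List (String × String))) :=
  -- {sid(ex): [] for ex in data}  (duplicate keys overwrite in place: same [] value, first position kept)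
  let songs := data.foldl (fun d ex => d.insert (pvSid ex) ([] : List (List (String × String)))) PySem.Dict.empty
  -- for ex in sorted(data, key=name): songs[sid(ex)].append(ex) — the key is always present, so
  -- songs[sid].append = Dict.modify with never-used default []
  let filled := (PySem.List.sorted data pvName false).foldl
      (fun d ex => d.modify (pvSid ex) [] (fun l => l ++ [ex])) songs
  filled.items

-- ===== PRECONDITION & SPEC =====
-- Pre_ excludes exactly the inputs where Python A raises KeyError: an example dict without a
-- "song_name" key (both A and B raise there).
def Pre_group_examples_by_song (data : List (List (String × String))) : Prop :=
  (data.all (fun ex => ex.any (fun p => p.1 == "song_name"))) = true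
instance (data : List (List (String × String))) : Decidable (Pre_group_examples_by_song data) := by
  unfold Pre_group_examples_by_song; infer_instance

def pvWitness_group_examples_by_song : (List (List (String × String))) :=
  [[("song_name", "s_line1"), ("text", "b")], [("song_name", "s_line0"), ("text", "a")], [("song_name", "t_line0")]]

def Spec_group_examples_by_song (data : List (List (String × String))) (out : List (String × List (List (String × String)))) : Prop := out = group_examples_by_song_alt data
instance (data : List (List (String × String))) (out : List (String × List (List (String × String)))) : Decidable (Spec_group_examples_by_song data out) := by unfold Spec_group_examples_by_song; infer_instance

-- ===== CLAIM (what is proved, stated in full; the proofs are below) =====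
def Claim_equal_group_examples_by_song : Prop := ∀ (data : List (List (String × String))), Dom_group_examples_by_song data → Pre_group_examples_by_song data → Spec_group_examples_by_song data (group_examples_by_song data)

-- ===== LEMMAS AND PROOFS =====

-- `insertBy x` puts x in front when x goes before every element
theorem pv_insertBy_eq_cons {a : Type} (bef : a → a → Bool) (x : a) (ys : List a)
    (h : ∀ z, z ∈ ys → bef x z = true) : PySem.List.insertBy bef x ys = x :: ys := by
  cases ys with
  | nil => rfl
  | cons y t => simp [PySem.List.insertBy, h y (by simp)]

-- insertion keeps the accumulator sorted
theorem pv_insertBy_pairwise {a k : Type} [LinearOrder k] (key : a → k) (x : a) (ys : List a)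
    (h : ys.Pairwise (fun u v => key u ≤ key v)) :
    (PySem.List.insertBy (fun u v => decide (key u < key v)) x ys).Pairwise (fun u v => key u ≤ key v) := by
  induction ys with
  | nil => simp [PySem.List.insertBy]
  | cons y t ih =>
    rcases List.pairwise_cons.1 h with ⟨hy, ht⟩
    by_cases hlt : key x < key y
    . simp only [PySem.List.insertBy, hlt, decide_true, if_true]
      refine List.pairwise_cons.2 ⟨?_, h⟩
      intro z hz
      rcases List.mem_cons.1 hz with rfl | hz
      . exact le_of_lt hlt
      . exact le_trans (le_of_lt hlt) (hy z hz)
    . simp only [PySem.List.insertBy, hlt, decide_false]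
      refine List.pairwise_cons.2 ⟨?_, ih ht⟩
      intro z hz
      rcases (PySem.List.mem_insertBy _ _ _ _).1 hz with rfl | hz
      . exact le_of_not_gt hlt
      . exact hy z hz

-- filter commutes with one stable insertion into a sorted accumulator
theorem pv_filter_insertBy {a k : Type} [LinearOrder k] (p : a → Bool) (key : a → k) (x : a)
    (ys : List a) (h : ys.Pairwise (fun u v => key u ≤ key v)) :
    (PySem.List.insertBy (fun u v => decide (key u < key v)) x ys).filter p =
      if p x then PySem.List.insertBy (fun u v => decide (key u < key v)) x (ys.filter p)
      else ys.filter p := by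
  induction ys with
  | nil => cases hp : p x <;> simp [PySem.List.insertBy, List.filter, hp]
  | cons y t ih =>
    rcases List.pairwise_cons.1 h with ⟨hy, ht⟩
    by_cases hlt : key x < key y
    . -- x is inserted right here; in the filtered list it also goes in front
      have hstep : PySem.List.insertBy (fun u v => decide (key u < key v)) x (y :: t) = x :: y :: t := by
        simp [PySem.List.insertBy, hlt]
      have hfront : ∀ z, z ∈ (y :: t).filter p → (fun u v => decide (key u < key v)) x z = true := by
        intro z hz
        rcases List.mem_cons.1 (List.mem_of_mem_filter hz) with rfl | hz
        . simpa using hlt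
        . simpa using lt_of_lt_of_le hlt (hy z hz)
      rw [hstep]
      cases hp : p x
      . simp [List.filter_cons, hp]
      . rw [pv_insertBy_eq_cons _ _ _ hfront]
        simp [List.filter_cons, hp]
    . -- x passes y
      simp only [PySem.List.insertBy, hlt, decide_false]
      cases hpy : p y
      . simpa [List.filter_cons, hpy] using ih ht
      . cases hpx : p x
        . simp [hpy, hpx, ih ht]
        . rw [List.filter_cons]
          simp [hpy, ih ht, hpx, PySem.List.insertBy, hlt]

-- stable-sort/filter commutation, fold form
theorem pv_foldl_insertBy_filter {a k : Type} [LinearOrder k] (p : a → Bool) (key : a → k)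
    (xs : List a) : ∀ ys, ys.Pairwise (fun u v => key u ≤ key v) →
    (xs.foldl (fun acc x => PySem.List.insertBy (fun u v => decide (key u < key v)) x acc) ys).filter p =
      (xs.filter p).foldl (fun acc x => PySem.List.insertBy (fun u v => decide (key u < key v)) x acc) (ys.filter p) := by
  induction xs with
  | nil => intro ys _; rfl
  | cons x xs ih =>
    intro ys hys
    have h1 := ih (PySem.List.insertBy (fun u v => decide (key u < key v)) x ys)
      (pv_insertBy_pairwise key x ys hys)
    cases hp : p x
    . simp [List.foldl_cons, h1, pv_filter_insertBy p key x ys hys, hp]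
    . simp [List.foldl_cons, h1, pv_filter_insertBy p key x ys hys, hp]

-- Python's sort is stable: filtering commutes with sorting
theorem pv_filter_sorted {a k : Type} [LinearOrder k] (p : a → Bool) (key : a → k) (xs : List a) :
    (PySem.List.sorted xs key false).filter p = PySem.List.sorted (xs.filter p) key false := by
  rw [PySem.List.sorted_eq_foldl_insertBy, PySem.List.sorted_eq_foldl_insertBy]
  simpa using pv_foldl_insertBy_filter p key xs [] (by simp)

-- the grouping fold of A, characterised: keys in first-occurrence order, values = filters
theorem pv_A_items (data : List (List (String × String))) :
    (data.foldl (fun d ex => d.modify (pvSid ex) [] (fun l => l ++ [ex])) PySem.Dict.empty).items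
      = (PySem.Set.ofList (data.map pvSid)).map (fun kk => (kk, data.filter (fun ex => pvSid ex == kk))) := by
  have hk : (data.foldl (fun d ex => d.modify (pvSid ex) [] (fun l => l ++ [ex])) PySem.Dict.empty).keys
      = PySem.Set.ofList (data.map pvSid) := by
    have h := PySem.Dict.keys_foldl_modify_key data pvSid ([] : List (List (String × String)))
      (fun _ x => fun l => l ++ [x]) PySem.Dict.empty
    simpa [PySem.Dict.keys_empty, PySem.Set.update_empty] using h
  have hnd : (data.foldl (fun d ex => d.modify (pvSid ex) [] (fun l => l ++ [ex])) PySem.Dict.empty).keys.Nodup := by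
    exact PySem.Dict.nodup_keys_foldl_modify_key data pvSid _ _ _ (by simp [PySem.Dict.keys_empty])
  have hg : ∀ kk, (data.foldl (fun d ex => d.modify (pvSid ex) [] (fun l => l ++ [ex])) PySem.Dict.empty).getD kk []
      = data.filter (fun ex => pvSid ex == kk) := by
    intro kk
    have h1 : data.foldl (fun d ex => d.modify (pvSid ex) [] (fun l => l ++ [ex])) PySem.Dict.empty
        = (data.map (fun ex => (pvSid ex, ex))).foldl (fun d q => d.modify q.1 [] (fun l => l ++ [q.2])) PySem.Dict.empty := by
      rw [List.foldl_map]
    rw [h1, PySem.Dict.getD_foldl_modify_append]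
    simp [List.filter_map, Function.comp_def, List.map_map]
  rw [PySem.Dict.items_eq_map_keys _ hnd ([] : List (List (String × String))), hk]
  exact List.map_congr_left (fun kk _ => by rw [hg kk])

-- phase 1 of B: every key maps to []
theorem pv_B1_getD (l : List (List (String × String))) (d : PySem.Dict String (List (List (String × String))))
    (kk : String) (h : d.getD kk [] = []) :
    (l.foldl (fun d ex => d.insert (pvSid ex) []) d).getD kk [] = [] := by
  induction l generalizing d with
  | nil => exact h
  | cons x xs ih =>
    refine ih _ ?_
    rw [PySem.Dict.getD_insert]
    split_ifs <;> simp [h]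

-- B, characterised: same keys, values = filters of the globally sorted list
theorem pv_B_items (data : List (List (String × String))) :
    group_examples_by_song_alt data
      = (PySem.Set.ofList (data.map pvSid)).map
          (fun kk => (kk, (PySem.List.sorted data pvName false).filter (fun ex => pvSid ex == kk))) := by
  show (((PySem.List.sorted data pvName false).foldl
      (fun d ex => d.modify (pvSid ex) [] (fun l => l ++ [ex]))
      (data.foldl (fun d ex => d.insert (pvSid ex) []) PySem.Dict.empty))).items = _
  have hk1 : (data.foldl (fun d ex => d.insert (pvSid ex) ([] : List (List (String × String)))) PySem.Dict.empty).keys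
      = PySem.Set.ofList (data.map pvSid) := by
    have h := PySem.Dict.keys_foldl_insert_key data pvSid
      (fun _ _ => ([] : List (List (String × String)))) PySem.Dict.empty
    simpa [PySem.Dict.keys_empty, PySem.Set.update_empty] using h
  have hnd1 : (data.foldl (fun d ex => d.insert (pvSid ex) ([] : List (List (String × String)))) PySem.Dict.empty).keys.Nodup :=
    PySem.Dict.nodup_keys_foldl_insert_key data pvSid _ _ (by simp [PySem.Dict.keys_empty])
  have hk : (((PySem.List.sorted data pvName false).foldl
      (fun d ex => d.modify (pvSid ex) [] (fun l => l ++ [ex]))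
      (data.foldl (fun d ex => d.insert (pvSid ex) []) PySem.Dict.empty))).keys
      = PySem.Set.ofList (data.map pvSid) := by
    have h := PySem.Dict.keys_foldl_modify_key (PySem.List.sorted data pvName false) pvSid
      ([] : List (List (String × String))) (fun _ x => fun l => l ++ [x])
      (data.foldl (fun d ex => d.insert (pvSid ex) []) PySem.Dict.empty)
    rw [h, hk1, PySem.Set.update_eq_append_filter]
    have hnil : ((PySem.Set.ofList ((PySem.List.sorted data pvName false).map pvSid)).filter
        (fun y => !(PySem.Set.contains (PySem.Set.ofList (data.map pvSid)) y))) = [] := by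
      rw [List.filter_eq_nil_iff]
      intro y hy
      have : y ∈ data.map pvSid := by
        rcases List.mem_map.1 ((PySem.Set.mem_ofList _ _).1 hy) with ⟨ex, hex, rfl⟩
        exact List.mem_map_of_mem ((PySem.List.mem_sorted data pvName false ex).1 hex)
      simpa using this
    rw [hnil, List.append_nil]
  have hnd : (((PySem.List.sorted data pvName false).foldl
      (fun d ex => d.modify (pvSid ex) [] (fun l => l ++ [ex]))
      (data.foldl (fun d ex => d.insert (pvSid ex) []) PySem.Dict.empty))).keys.Nodup :=
    PySem.Dict.nodup_keys_foldl_modify_key _ pvSid _ _ _ hnd1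
  have hg : ∀ kk, (((PySem.List.sorted data pvName false).foldl
      (fun d ex => d.modify (pvSid ex) [] (fun l => l ++ [ex]))
      (data.foldl (fun d ex => d.insert (pvSid ex) []) PySem.Dict.empty))).getD kk []
      = (PySem.List.sorted data pvName false).filter (fun ex => pvSid ex == kk) := by
    intro kk
    have h1 : (PySem.List.sorted data pvName false).foldl
        (fun d ex => d.modify (pvSid ex) [] (fun l => l ++ [ex]))
        (data.foldl (fun d ex => d.insert (pvSid ex) []) PySem.Dict.empty)
        = ((PySem.List.sorted data pvName false).map (fun ex => (pvSid ex, ex))).foldl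
            (fun d q => d.modify q.1 [] (fun l => l ++ [q.2]))
            (data.foldl (fun d ex => d.insert (pvSid ex) []) PySem.Dict.empty) := by
      rw [List.foldl_map]
    rw [h1, PySem.Dict.getD_foldl_modify_append,
      pv_B1_getD data PySem.Dict.empty kk (by simp [PySem.Dict.getD_empty])]
    simp [List.filter_map, Function.comp_def, List.map_map]
  rw [PySem.Dict.items_eq_map_keys _ hnd ([] : List (List (String × String))), hk]
  exact List.map_congr_left (fun kk _ => by rw [hg kk])

-- the two programs agree on every input
theorem pv_main (data : List (List (String × String))) :
    group_examples_by_song data = group_examples_by_song_alt data := by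
  show ((data.foldl (fun d ex => d.modify (pvSid ex) [] (fun l => l ++ [ex])) PySem.Dict.empty).items).map
      (fun kv => (kv.1, PySem.List.sorted kv.2 pvName false)) = _
  rw [pv_A_items, pv_B_items, List.map_map]
  refine List.map_congr_left (fun kk _ => ?_)
  simp only [Function.comp_def]
  rw [← pv_filter_sorted (fun ex => pvSid ex == kk) pvName data]

-- ===== VERDICT (by name: the statement is the Claim_ definition above) =====
theorem group_examples_by_song_spec : Claim_equal_group_examples_by_song := by
  intro data _ _
  show group_examples_by_song data = group_examples_by_song_alt data
  exact pv_main data
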